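-- pv_equiv track=rewrite | github.com/kocurvik/mdrp | utils/data.py | get_experiments
-- ===== SOURCE A (Python) =====
-- def get_experiments(prefix, depths=None, master=False):
--     experiments = []
--     if depths is None:
--         mdepths = [1, 2, 6, 10, 12]
--         depths = [1, 2, 6, 10, 12]
--     elif master:
--         depths = [1]
--         mdepths = [1]
--     else:
--         mdepths = depths
--
--     if 'calib' in prefix:
--         experiments.extend([f'3p_reldepth+{i}' for i in depths])
--         experiments.extend([f'3p_ours_shift_scale+{i}' for i in depths])
--         experiments.extend([f'3p_ours_shift_scale_reproj+{i}' for i in depths])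
--         experiments.extend([f'3p_ours_shift_scale_reproj-s+{i}' for i in depths])
--         experiments.extend([f'p3p+{i}' for i in depths])
--         experiments.extend([f'p3p_reproj+{i}' for i in depths])
--         experiments.extend([f'p3p_reproj-s+{i}' for i in depths])
--         experiments.extend([f'mad_poselib_shift_scale+{i}' for i in depths])
--         experiments.extend([f'mad_poselib_shift_scale_reproj+{i}' for i in depths])
--         experiments.extend([f'mad_poselib_shift_scale_reproj-s+{i}' for i in depths])
--         experiments.extend([f'madpose+{i}' for i in mdepths])
--         experiments.extend([f'madpose_ours_scale_shift+{i}' for i in mdepths])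
--         experiments.append('5p')
--
--     if 'shared' in prefix:
--         experiments.extend([f'3p_reldepth+{i}' for i in depths])
--         experiments.extend([f'4p_ours_scale_shift+{i}' for i in depths])
--         experiments.extend([f'4p_ours_scale_shift_reproj+{i}' for i in depths])
--         experiments.extend([f'4p_ours_scale_shift_reproj-s+{i}' for i in depths])
--         experiments.extend([f'3p_ours_scale+{i}' for i in depths])
--         experiments.extend([f'3p_ours_scale_reproj+{i}' for i in depths])
--         experiments.extend([f'3p_ours_scale_reproj-s+{i}' for i in depths])
--         experiments.extend([f'3p_ours+{i}' for i in depths])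
--         experiments.extend([f'3p_ours_reproj+{i}' for i in depths])
--         experiments.extend([f'3p_ours_reproj-s+{i}' for i in depths])
--         experiments.extend([f'mad_poselib_shift_scale+{i}' for i in depths])
--         experiments.extend([f'mad_poselib_shift_scale_reproj+{i}' for i in depths])
--         experiments.extend([f'mad_poselib_shift_scale_reproj-s+{i}' for i in depths])
--         experiments.extend([f'madpose+{i}' for i in mdepths])
--         experiments.extend([f'madpose_ours_scale+{i}' for i in mdepths])
--         experiments.append('6p')
--
--     if 'varying' in prefix:
--         experiments.extend([f'4p4d+{i}' for i in depths])
--         experiments.extend([f'4p_ours_scale_shift+{i}' for i in depths])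
--         experiments.extend([f'4p_ours_scale_shift_reproj+{i}' for i in depths])
--         experiments.extend([f'4p_ours_scale_shift_reproj-s+{i}' for i in depths])
--         experiments.extend([f'3p_ours_scale+{i}' for i in depths])
--         experiments.extend([f'3p_ours_scale_reproj+{i}' for i in depths])
--         experiments.extend([f'3p_ours_scale_reproj-s+{i}' for i in depths])
--         experiments.extend([f'3p_ours+{i}' for i in depths])
--         experiments.extend([f'3p_ours_reproj+{i}' for i in depths])
--         experiments.extend([f'3p_ours_reproj-s+{i}' for i in depths])
--         experiments.extend([f'mad_poselib_shift_scale+{i}' for i in depths])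
--         experiments.extend([f'mad_poselib_shift_scale_reproj+{i}' for i in depths])
--         experiments.extend([f'mad_poselib_shift_scale_reproj-s+{i}' for i in depths])
--         experiments.extend([f'madpose+{i}' for i in mdepths])
--         experiments.extend([f'madpose_ours_scale+{i}' for i in mdepths])
--         experiments.append('7p')
--
--     if master:
--         experiments.append('mast3r')
--
--     return experiments
-- ===== SOURCE B (Python) =====
-- # Builds the experiment list back-to-front: walks the sections, their templates
-- # and the depth lists all in reverse order, pushing onto one accumulator, and
-- # reverses once at the end.
--
-- _SECTIONS = [
--     ('calib',
--      [('3p_reldepth', False), ('3p_ours_shift_scale', False),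
--       ('3p_ours_shift_scale_reproj', False), ('3p_ours_shift_scale_reproj-s', False),
--       ('p3p', False), ('p3p_reproj', False), ('p3p_reproj-s', False),
--       ('mad_poselib_shift_scale', False), ('mad_poselib_shift_scale_reproj', False),
--       ('mad_poselib_shift_scale_reproj-s', False),
--       ('madpose', True), ('madpose_ours_scale_shift', True)],
--      '5p'),
--     ('shared',
--      [('3p_reldepth', False), ('4p_ours_scale_shift', False),
--       ('4p_ours_scale_shift_reproj', False), ('4p_ours_scale_shift_reproj-s', False),
--       ('3p_ours_scale', False), ('3p_ours_scale_reproj', False), ('3p_ours_scale_reproj-s', False),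
--       ('3p_ours', False), ('3p_ours_reproj', False), ('3p_ours_reproj-s', False),
--       ('mad_poselib_shift_scale', False), ('mad_poselib_shift_scale_reproj', False),
--       ('mad_poselib_shift_scale_reproj-s', False),
--       ('madpose', True), ('madpose_ours_scale', True)],
--      '6p'),
--     ('varying',
--      [('4p4d', False), ('4p_ours_scale_shift', False),
--       ('4p_ours_scale_shift_reproj', False), ('4p_ours_scale_shift_reproj-s', False),
--       ('3p_ours_scale', False), ('3p_ours_scale_reproj', False), ('3p_ours_scale_reproj-s', False),
--       ('3p_ours', False), ('3p_ours_reproj', False), ('3p_ours_reproj-s', False),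
--       ('mad_poselib_shift_scale', False), ('mad_poselib_shift_scale_reproj', False),
--       ('mad_poselib_shift_scale_reproj-s', False),
--       ('madpose', True), ('madpose_ours_scale', True)],
--      '7p'),
-- ]
--
--
-- def get_experiments(prefix, depths=None, master=False):
--     if depths is None:
--         depths = mdepths = [1, 2, 6, 10, 12]
--     elif master:
--         depths = mdepths = [1]
--     else:
--         mdepths = depths
--     rev = ['mast3r'] if master else []
--     for keyword, templates, trailing in reversed(_SECTIONS):
--         if keyword in prefix:
--             rev.append(trailing)
--             for name, uses_mdepth in reversed(templates):
--                 for i in reversed(mdepths if uses_mdepth else depths):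
--                     rev.append(f'{name}+{i}')
--     rev.reverse()
--     return rev
-- ===== Notes on version B (the rewrite author's own statement) =====
-- stated objective: alternative
-- what changed: B builds the list back-to-front: it walks the sections, their templates and the depth lists all in reverse order, pushing each name onto a single accumulator (seeded with 'mast3r' when master), and reverses once at the end, instead of A's three forward blocks of a dozen extend calls.
import Mathlib
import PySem

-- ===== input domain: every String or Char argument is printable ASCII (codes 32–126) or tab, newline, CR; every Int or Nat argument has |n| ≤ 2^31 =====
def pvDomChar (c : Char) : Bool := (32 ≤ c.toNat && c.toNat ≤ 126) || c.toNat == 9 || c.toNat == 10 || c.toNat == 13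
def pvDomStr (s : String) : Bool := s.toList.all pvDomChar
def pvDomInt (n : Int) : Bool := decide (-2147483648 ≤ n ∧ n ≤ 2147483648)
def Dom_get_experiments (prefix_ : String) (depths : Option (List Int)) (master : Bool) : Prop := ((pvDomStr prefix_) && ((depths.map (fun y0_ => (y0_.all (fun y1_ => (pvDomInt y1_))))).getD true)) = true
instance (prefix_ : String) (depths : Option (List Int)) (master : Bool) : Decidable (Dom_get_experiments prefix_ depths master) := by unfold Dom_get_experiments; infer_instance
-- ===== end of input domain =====

-- B builds the same list back-to-front (reversed sections/templates/depths onto one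
-- accumulator, one final reverse) instead of A's three forward blocks of extend calls.

-- ===== PORT A =====
def get_experiments (prefix_ : String) (depths : Option (List Int)) (master : Bool) : List String :=
  let dm : List Int × List Int :=
    match depths with
    | none => ([1, 2, 6, 10, 12], [1, 2, 6, 10, 12])
    | some d => if master then ([1], [1]) else (d, d)
  let depths := dm.1
  let mdepths := dm.2
  let experiments : List String := []
  let experiments :=
    if PySem.Str.isIn "calib" prefix_ then
      experiments
        ++ depths.map (fun i => "3p_reldepth+" ++ PySem.Int.toStr i)
        ++ depths.map (fun i => "3p_ours_shift_scale+" ++ PySem.Int.toStr i)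
        ++ depths.map (fun i => "3p_ours_shift_scale_reproj+" ++ PySem.Int.toStr i)
        ++ depths.map (fun i => "3p_ours_shift_scale_reproj-s+" ++ PySem.Int.toStr i)
        ++ depths.map (fun i => "p3p+" ++ PySem.Int.toStr i)
        ++ depths.map (fun i => "p3p_reproj+" ++ PySem.Int.toStr i)
        ++ depths.map (fun i => "p3p_reproj-s+" ++ PySem.Int.toStr i)
        ++ depths.map (fun i => "mad_poselib_shift_scale+" ++ PySem.Int.toStr i)
        ++ depths.map (fun i => "mad_poselib_shift_scale_reproj+" ++ PySem.Int.toStr i)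
        ++ depths.map (fun i => "mad_poselib_shift_scale_reproj-s+" ++ PySem.Int.toStr i)
        ++ mdepths.map (fun i => "madpose+" ++ PySem.Int.toStr i)
        ++ mdepths.map (fun i => "madpose_ours_scale_shift+" ++ PySem.Int.toStr i)
        ++ ["5p"]
    else experiments
  let experiments :=
    if PySem.Str.isIn "shared" prefix_ then
      experiments
        ++ depths.map (fun i => "3p_reldepth+" ++ PySem.Int.toStr i)
        ++ depths.map (fun i => "4p_ours_scale_shift+" ++ PySem.Int.toStr i)
        ++ depths.map (fun i => "4p_ours_scale_shift_reproj+" ++ PySem.Int.toStr i)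
        ++ depths.map (fun i => "4p_ours_scale_shift_reproj-s+" ++ PySem.Int.toStr i)
        ++ depths.map (fun i => "3p_ours_scale+" ++ PySem.Int.toStr i)
        ++ depths.map (fun i => "3p_ours_scale_reproj+" ++ PySem.Int.toStr i)
        ++ depths.map (fun i => "3p_ours_scale_reproj-s+" ++ PySem.Int.toStr i)
        ++ depths.map (fun i => "3p_ours+" ++ PySem.Int.toStr i)
        ++ depths.map (fun i => "3p_ours_reproj+" ++ PySem.Int.toStr i)
        ++ depths.map (fun i => "3p_ours_reproj-s+" ++ PySem.Int.toStr i)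
        ++ depths.map (fun i => "mad_poselib_shift_scale+" ++ PySem.Int.toStr i)
        ++ depths.map (fun i => "mad_poselib_shift_scale_reproj+" ++ PySem.Int.toStr i)
        ++ depths.map (fun i => "mad_poselib_shift_scale_reproj-s+" ++ PySem.Int.toStr i)
        ++ mdepths.map (fun i => "madpose+" ++ PySem.Int.toStr i)
        ++ mdepths.map (fun i => "madpose_ours_scale+" ++ PySem.Int.toStr i)
        ++ ["6p"]
    else experiments
  let experiments :=
    if PySem.Str.isIn "varying" prefix_ then
      experiments
        ++ depths.map (fun i => "4p4d+" ++ PySem.Int.toStr i)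
        ++ depths.map (fun i => "4p_ours_scale_shift+" ++ PySem.Int.toStr i)
        ++ depths.map (fun i => "4p_ours_scale_shift_reproj+" ++ PySem.Int.toStr i)
        ++ depths.map (fun i => "4p_ours_scale_shift_reproj-s+" ++ PySem.Int.toStr i)
        ++ depths.map (fun i => "3p_ours_scale+" ++ PySem.Int.toStr i)
        ++ depths.map (fun i => "3p_ours_scale_reproj+" ++ PySem.Int.toStr i)
        ++ depths.map (fun i => "3p_ours_scale_reproj-s+" ++ PySem.Int.toStr i)
        ++ depths.map (fun i => "3p_ours+" ++ PySem.Int.toStr i)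
        ++ depths.map (fun i => "3p_ours_reproj+" ++ PySem.Int.toStr i)
        ++ depths.map (fun i => "3p_ours_reproj-s+" ++ PySem.Int.toStr i)
        ++ depths.map (fun i => "mad_poselib_shift_scale+" ++ PySem.Int.toStr i)
        ++ depths.map (fun i => "mad_poselib_shift_scale_reproj+" ++ PySem.Int.toStr i)
        ++ depths.map (fun i => "mad_poselib_shift_scale_reproj-s+" ++ PySem.Int.toStr i)
        ++ mdepths.map (fun i => "madpose+" ++ PySem.Int.toStr i)
        ++ mdepths.map (fun i => "madpose_ours_scale+" ++ PySem.Int.toStr i)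
        ++ ["7p"]
    else experiments
  let experiments := if master then experiments ++ ["mast3r"] else experiments
  experiments

-- ===== PORT B =====
def pvFmt (name : String) (i : Int) : String := name ++ "+" ++ PySem.Int.toStr i

def pvSections : List (String × List (String × Bool) × String) :=
  [ ("calib",
     ([("3p_reldepth", false), ("3p_ours_shift_scale", false),
       ("3p_ours_shift_scale_reproj", false), ("3p_ours_shift_scale_reproj-s", false),
       ("p3p", false), ("p3p_reproj", false), ("p3p_reproj-s", false),
       ("mad_poselib_shift_scale", false), ("mad_poselib_shift_scale_reproj", false),
       ("mad_poselib_shift_scale_reproj-s", false),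
       ("madpose", true), ("madpose_ours_scale_shift", true)],
      "5p")),
    ("shared",
     ([("3p_reldepth", false), ("4p_ours_scale_shift", false),
       ("4p_ours_scale_shift_reproj", false), ("4p_ours_scale_shift_reproj-s", false),
       ("3p_ours_scale", false), ("3p_ours_scale_reproj", false), ("3p_ours_scale_reproj-s", false),
       ("3p_ours", false), ("3p_ours_reproj", false), ("3p_ours_reproj-s", false),
       ("mad_poselib_shift_scale", false), ("mad_poselib_shift_scale_reproj", false),
       ("mad_poselib_shift_scale_reproj-s", false),
       ("madpose", true), ("madpose_ours_scale", true)],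
      "6p")),
    ("varying",
     ([("4p4d", false), ("4p_ours_scale_shift", false),
       ("4p_ours_scale_shift_reproj", false), ("4p_ours_scale_shift_reproj-s", false),
       ("3p_ours_scale", false), ("3p_ours_scale_reproj", false), ("3p_ours_scale_reproj-s", false),
       ("3p_ours", false), ("3p_ours_reproj", false), ("3p_ours_reproj-s", false),
       ("mad_poselib_shift_scale", false), ("mad_poselib_shift_scale_reproj", false),
       ("mad_poselib_shift_scale_reproj-s", false),
       ("madpose", true), ("madpose_ours_scale", true)],
      "7p")) ]

def get_experiments_alt (prefix_ : String) (depths : Option (List Int)) (master : Bool) : List String :=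
  let dm : List Int × List Int :=
    match depths with
    | none => ([1, 2, 6, 10, 12], [1, 2, 6, 10, 12])
    | some d => if master then ([1], [1]) else (d, d)
  let rev0 : List String := if master then ["mast3r"] else []
  let rev :=
    pvSections.reverse.foldl (fun acc entry =>
      if PySem.Str.isIn entry.1 prefix_ then
        entry.2.1.reverse.foldl (fun a2 t =>
          (if t.2 then dm.2 else dm.1).reverse.foldl (fun a3 i => a3 ++ [pvFmt t.1 i]) a2)
          (acc ++ [entry.2.2])
      else acc) rev0
  rev.reverse

-- ===== PRECONDITION & SPEC =====
def Spec_get_experiments (prefix_ : String) (depths : Option (List Int)) (master : Bool) (out : List String) : Prop := out = get_experiments_alt prefix_ depths master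
instance (prefix_ : String) (depths : Option (List Int)) (master : Bool) (out : List String) : Decidable (Spec_get_experiments prefix_ depths master out) := by unfold Spec_get_experiments; infer_instance

-- ===== CLAIM (what is proved, stated in full; the proofs are below) =====
def Claim_equal_get_experiments : Prop := ∀ (prefix_ : String) (depths : Option (List Int)) (master : Bool), Dom_get_experiments prefix_ depths master → Spec_get_experiments prefix_ depths master (get_experiments prefix_ depths master)

-- ===== LEMMAS AND PROOFS =====
theorem foldl_app_singleton {α β : Type} (f : α → β) :
    ∀ (l : List α) (acc : List β), l.foldl (fun a i => a ++ [f i]) acc = acc ++ l.map f := by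
  intro l
  induction l with
  | nil => simp
  | cons x xs ih => intro acc; simp [List.foldl, ih]

set_option maxRecDepth 8192 in
theorem ports_agree (prefix_ : String) (depths : Option (List Int)) (master : Bool) :
    get_experiments prefix_ depths master = get_experiments_alt prefix_ depths master := by
  unfold get_experiments get_experiments_alt pvSections pvFmt
  generalize (match depths with
    | none => (([1, 2, 6, 10, 12] : List Int), ([1, 2, 6, 10, 12] : List Int))
    | some d => if master then ([1], [1]) else (d, d)) = p
  obtain ⟨dep, mdep⟩ := p
  simp only [List.reverse_cons, List.reverse_nil, List.nil_append, List.cons_append,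
    List.foldl, foldl_app_singleton]
  split_ifs <;> first
    | exact (by assumption : False).elim
    | simp [List.reverse_append, List.map_reverse, List.reverse_reverse, List.append_assoc]

-- ===== VERDICT (by name: the statement is the Claim_ definition above) =====
theorem get_experiments_spec : Claim_equal_get_experiments := by
  intro prefix_ depths master _
  unfold Spec_get_experiments
  exact ports_agree prefix_ depths master
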